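-- pv_equiv track=rewrite | github.com/AMIVAYUN/codeTestPrac | Programmers/체육복.py | solution
-- ===== SOURCE A (Python) =====
-- def solution(n, lost, reserve):
--     ditL = { i : 0 for i in lost };
--     ditR = { r : 0 for r in reserve };
--
--     for i in ditL :
--         if i in ditR:
--             ditL[ i ] = 1;
--             ditR[ i ] = 1;
--
--     ditL = { i: 0 for i in ditL if not( ditL[ i ] ) }
--     ditR = { i: 0 for i in ditR if not( ditR[ i ] ) }
--
--
--
--     for i in sorted( ditR ):
--         if( ( i - 1 ) in ditL ):
--             ditL.pop( i - 1 ) ;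
--         elif( ( i + 1 ) in ditL ):
--             ditL.pop( i + 1 );
--
--
--     return n - len( ditL );
-- ===== SOURCE B (Python) =====
-- def solution(n, lost, reserve):
--     L = sorted(set(lost) - set(reserve))
--     R = sorted(set(reserve) - set(lost))
--     i = 0
--     matched = 0
--     for r in R:
--         while i < len(L) and L[i] < r - 1:
--             i += 1
--         if i < len(L) and (L[i] == r - 1 or L[i] == r + 1):
--             matched += 1
--             i += 1
--     return n - (len(L) - matched)
-- ===== Notes on version B (the rewrite author's own statement) =====
-- stated objective: alternative
-- what changed: Replaces A's dict bookkeeping (two 0/1-marked dicts, then popping neighbors out of the lost-dict while iterating the sorted reserve keys) with set differences and a single two-pointer sweep that consumes a sorted lost list from the front against the sorted reserve list, counting matches.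
import Mathlib
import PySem

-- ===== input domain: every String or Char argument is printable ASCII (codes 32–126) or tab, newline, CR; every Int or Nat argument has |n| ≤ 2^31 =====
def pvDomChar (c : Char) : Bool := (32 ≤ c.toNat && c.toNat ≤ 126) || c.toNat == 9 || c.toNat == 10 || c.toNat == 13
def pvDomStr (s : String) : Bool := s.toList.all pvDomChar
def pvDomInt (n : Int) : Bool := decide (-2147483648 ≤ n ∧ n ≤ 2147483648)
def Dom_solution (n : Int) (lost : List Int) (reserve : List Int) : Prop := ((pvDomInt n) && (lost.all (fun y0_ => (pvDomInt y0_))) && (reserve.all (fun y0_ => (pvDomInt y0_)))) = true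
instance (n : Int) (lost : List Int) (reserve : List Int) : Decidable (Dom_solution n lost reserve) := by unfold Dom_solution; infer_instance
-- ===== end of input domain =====

-- B replaces A's dict-popping greedy with a sorted two-pointer sweep over the deduplicated
-- lost/reserve lists (objective: alternative algorithm of similar cost; equal return value, no observable mutation).


-- ===== PORT A =====
-- ditL = { i : 0 for i in lost }  (dict comprehension = insert fold)
def pvMkZero (xs : List Int) : PySem.Dict Int Int :=
  xs.foldl (fun d i => d.insert i 0) PySem.Dict.empty

-- for i in ditL: if i in ditR: ditL[i] = 1; ditR[i] = 1   (iterates ditL's key list)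
def pvMark (l : List Int) (p : PySem.Dict Int Int × PySem.Dict Int Int) :
    PySem.Dict Int Int × PySem.Dict Int Int :=
  l.foldl (fun p i => if p.2.contains i then (p.1.insert i 1, p.2.insert i 1) else p) p

-- { i : 0 for i in dit if not(dit[i]) }  ('dit[i]' ported as 'getD i 0', exact here: i is always a key)
def pvFilterZero (src : PySem.Dict Int Int) : PySem.Dict Int Int :=
  src.keys.foldl (fun d i => if src.getD i 0 = 0 then d.insert i 0 else d) PySem.Dict.empty

-- for i in sorted(ditR): if (i-1) in ditL: ditL.pop(i-1) elif (i+1) in ditL: ditL.pop(i+1)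
-- ('pop' on a key just checked to be present = 'erase'; the popped value is discarded)
def pvLend (rs : List Int) (d : PySem.Dict Int Int) : PySem.Dict Int Int :=
  rs.foldl (fun d i =>
    if d.contains (i - 1) then d.erase (i - 1)
    else if d.contains (i + 1) then d.erase (i + 1)
    else d) d

def solution (n : Int) (lost : List Int) (reserve : List Int) : Int :=
  let ditL := pvMkZero lost
  let ditR := pvMkZero reserve
  let p := pvMark ditL.keys (ditL, ditR)
  let ditL2 := pvFilterZero p.1
  let ditR2 := pvFilterZero p.2
  n - (pvLend (PySem.List.sorted ditR2.keys (fun x => x) false) ditL2).size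

-- ===== PORT B =====
-- while i < len(L) and L[i] < r - 1: i += 1
def pvAdvance (L : List Int) (r : Int) (i : Nat) : Nat :=
  if h : i < L.length then
    if L[i] < r - 1 then pvAdvance L r (i + 1) else i
  else i
termination_by L.length - i

-- for r in R: <the while loop>; if i < len(L) and (L[i] == r-1 or L[i] == r+1): matched += 1; i += 1
def pvLendB : List Int → List Int → Nat → Int → Int
  | [], _, _, matched => matched
  | r :: rs, L, i, matched =>
    let j := pvAdvance L r i
    if h : j < L.length then
      if L[j] = r - 1 ∨ L[j] = r + 1 then pvLendB rs L (j + 1) (matched + 1)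
      else pvLendB rs L j matched
    else pvLendB rs L j matched

def solution_alt (n : Int) (lost : List Int) (reserve : List Int) : Int :=
  let L := PySem.List.sorted (PySem.Set.diff (PySem.Set.ofList lost) (PySem.Set.ofList reserve)) (fun x => x) false
  let R := PySem.List.sorted (PySem.Set.diff (PySem.Set.ofList reserve) (PySem.Set.ofList lost)) (fun x => x) false
  n - ((L.length : Int) - pvLendB R L 0 0)

-- ===== PRECONDITION & SPEC =====
def Spec_solution (n : Int) (lost : List Int) (reserve : List Int) (out : Int) : Prop := out = solution_alt n lost reserve
instance (n : Int) (lost : List Int) (reserve : List Int) (out : Int) : Decidable (Spec_solution n lost reserve out) := by unfold Spec_solution; infer_instance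

-- ===== CLAIM (what is proved, stated in full; the proofs are below) =====
def Claim_equal_solution : Prop := ∀ (n : Int) (lost : List Int) (reserve : List Int), Dom_solution n lost reserve → Spec_solution n lost reserve (solution n lost reserve)

-- ===== LEMMAS AND PROOFS =====

-- list-level abstraction of A's lending loop (erasing a key of a dict = filtering it out of the key list)
def aLoop (rs ks : List Int) : List Int :=
  rs.foldl (fun ks i =>
    if (i - 1) ∈ ks then ks.filter (fun x => !(x == i - 1))
    else if (i + 1) ∈ ks then ks.filter (fun x => !(x == i + 1))
    else ks) ks

-- proof-side reformulation of B's sweep on the suffix L[i:] (index i ↦ the suffix it points at)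
def sSkip (r : Int) : List Int → List Int
  | [] => []
  | x :: t => if x < r - 1 then sSkip r t else x :: t

def bLoop : List Int → List Int → Int → Int
  | [], _, u => u
  | r :: rs, L, u =>
    match sSkip r L with
    | [] => bLoop rs [] u
    | x :: t => if x = r - 1 ∨ x = r + 1 then bLoop rs t (u - 1) else bLoop rs (x :: t) u

theorem keys_mkZero (xs : List Int) : (pvMkZero xs).keys = PySem.Set.ofList xs := by
  simpa [pvMkZero, PySem.Set.update_nil_left] using
    PySem.Dict.keys_foldl_insert xs (fun _ _ => (0:Int)) PySem.Dict.empty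

theorem getD_mkZero_gen (xs : List Int) : ∀ (d : PySem.Dict Int Int) (x : Int),
    (∀ y, d.getD y 0 = 0) → (xs.foldl (fun d i => d.insert i 0) d).getD x 0 = 0 := by
  induction xs with
  | nil => intro d x h; exact h x
  | cons i t ih =>
      intro d x h
      simp only [List.foldl_cons]
      exact ih _ x (fun y => by rw [PySem.Dict.getD_insert]; split <;> simp [h])

theorem getD_mkZero (xs : List Int) (x : Int) : (pvMkZero xs).getD x 0 = 0 :=
  getD_mkZero_gen xs PySem.Dict.empty x (fun y => by simp [PySem.Dict.getD_empty])

theorem contains_mkZero (xs : List Int) (x : Int) :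
    (pvMkZero xs).contains x = decide (x ∈ xs) := by
  rw [PySem.Dict.contains_eq_decide_mem_keys, keys_mkZero]
  simp [PySem.Set.mem_ofList]

theorem size_eq_keys_length (d : PySem.Dict Int Int) : (d.size : Int) = (d.keys.length : Int) := by
  simp [PySem.Dict.size, PySem.Dict.keys]

theorem mark_spec (l : List Int) : ∀ (dL dR : PySem.Dict Int Int),
    (∀ i ∈ l, dL.contains i = true) →
    ((pvMark l (dL, dR)).1.keys = dL.keys ∧ (pvMark l (dL, dR)).2.keys = dR.keys) ∧
    (∀ x, (pvMark l (dL, dR)).1.getD x 0 =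
        if x ∈ l ∧ dR.contains x = true then 1 else dL.getD x 0) ∧
    (∀ x, (pvMark l (dL, dR)).2.getD x 0 =
        if x ∈ l ∧ dR.contains x = true then 1 else dR.getD x 0) := by
  induction l with
  | nil => intro dL dR h; simp [pvMark]
  | cons i t ih =>
      intro dL dR h
      by_cases hc : dR.contains i = true
      · have hstep : pvMark (i :: t) (dL, dR) = pvMark t (dL.insert i 1, dR.insert i 1) := by
          simp [pvMark, hc]
        have hL' : ∀ j ∈ t, (dL.insert i 1).contains j = true := by
          intro j hj
          rw [PySem.Dict.contains_insert]
          simp [h j (List.mem_cons_of_mem _ hj)]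
        obtain ⟨⟨hk1, hk2⟩, hg1, hg2⟩ := ih (dL.insert i 1) (dR.insert i 1) hL'
        rw [hstep]
        have hcontains : ∀ x, (dR.insert i 1).contains x = dR.contains x := by
          intro x
          rw [PySem.Dict.contains_insert]
          by_cases hx : x = i <;> simp [hx, hc]
        refine ⟨⟨?_, ?_⟩, ?_, ?_⟩
        · rw [hk1, PySem.Dict.keys_insert_of_contains dL 1 (h i (by simp))]
        · rw [hk2, PySem.Dict.keys_insert_of_contains dR 1 hc]
        · intro x
          rw [hg1 x]
          by_cases hx : x = i
          · subst hx
            simp [hcontains, hc]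
          · simp only [hcontains, PySem.Dict.getD_insert, if_neg hx]
            by_cases hxt : x ∈ t <;> simp [hxt, hx]
        · intro x
          rw [hg2 x]
          by_cases hx : x = i
          · subst hx
            simp [hcontains, hc]
          · simp only [hcontains, PySem.Dict.getD_insert, if_neg hx]
            by_cases hxt : x ∈ t <;> simp [hxt, hx]
      · have hstep : pvMark (i :: t) (dL, dR) = pvMark t (dL, dR) := by
          simp [pvMark, hc]
        obtain ⟨hk, hg1, hg2⟩ := ih dL dR (fun j hj => h j (List.mem_cons_of_mem _ hj))
        rw [hstep]
        refine ⟨hk, ?_, ?_⟩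
        · intro x
          rw [hg1 x]
          by_cases hx : x = i
          · subst hx; simp [hc]
          · simp [hx]
        · intro x
          rw [hg2 x]
          by_cases hx : x = i
          · subst hx; simp [hc]
          · simp [hx]

theorem foldl_insert_if_keys (P : Int → Prop) [DecidablePred P] (l : List Int) :
    ∀ (acc : PySem.Dict Int Int), l.Nodup → (∀ i ∈ l, acc.contains i = false) →
    (l.foldl (fun d i => if P i then d.insert i 0 else d) acc).keys
      = acc.keys ++ l.filter (fun i => decide (P i)) := by
  induction l with
  | nil => intro acc _ _; simp
  | cons i t ih =>
      intro acc hnd hfresh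
      simp only [List.foldl_cons, List.filter_cons]
      by_cases hp : P i
      · have hk : (acc.insert i 0).keys = acc.keys ++ [i] :=
          PySem.Dict.keys_insert_of_not_contains acc 0 (hfresh i (by simp))
        have hfresh' : ∀ j ∈ t, (acc.insert i 0).contains j = false := by
          intro j hj
          rw [PySem.Dict.contains_insert]
          have : j ≠ i := fun h => (List.nodup_cons.mp hnd).1 (h ▸ hj)
          simp [this, hfresh j (by simp [hj])]
        rw [if_pos hp, ih _ (List.nodup_cons.mp hnd).2 hfresh', hk]
        simp [hp]
      · rw [if_neg hp, ih _ (List.nodup_cons.mp hnd).2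
          (fun j hj => hfresh j (by simp [hj]))]
        simp [hp]

theorem filterZero_keys (d : PySem.Dict Int Int) (h : d.keys.Nodup) :
    (pvFilterZero d).keys = d.keys.filter (fun i => decide (d.getD i 0 = 0)) := by
  have := foldl_insert_if_keys (fun i => d.getD i 0 = 0) d.keys PySem.Dict.empty h
    (fun i _ => PySem.Dict.contains_empty i)
  simpa [pvFilterZero] using this

theorem keys_erase (d : PySem.Dict Int Int) (k : Int) :
    (d.erase k).keys = d.keys.filter (fun x => !(x == k)) := by
  simp [PySem.Dict.erase, PySem.Dict.keys, List.filter_map]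
  rfl

theorem lend_keys (rs : List Int) : ∀ (d : PySem.Dict Int Int),
    (pvLend rs d).keys = aLoop rs d.keys := by
  induction rs with
  | nil => intro d; rfl
  | cons i t ih =>
      intro d
      have h1 : pvLend (i :: t) d = pvLend t
          (if d.contains (i - 1) then d.erase (i - 1)
           else if d.contains (i + 1) then d.erase (i + 1) else d) := rfl
      have h2 : aLoop (i :: t) d.keys = aLoop t
          (if (i - 1) ∈ d.keys then d.keys.filter (fun x => !(x == i - 1))
           else if (i + 1) ∈ d.keys then d.keys.filter (fun x => !(x == i + 1))
           else d.keys) := rfl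
      rw [h1, h2, ih]
      congr 1
      rw [PySem.Dict.contains_eq_decide_mem_keys, PySem.Dict.contains_eq_decide_mem_keys]
      by_cases hm : (i - 1) ∈ d.keys
      · simp [hm, keys_erase]
      · by_cases hm2 : (i + 1) ∈ d.keys <;> simp [hm, hm2, keys_erase]

theorem aLoop_nil (rs : List Int) : aLoop rs [] = [] := by
  induction rs with
  | nil => rfl
  | cons i t ih => simpa [aLoop, List.foldl_cons] using ih

theorem aLoop_perm (rs : List Int) : ∀ {ks ks' : List Int}, ks.Perm ks' →
    (aLoop rs ks).Perm (aLoop rs ks') := by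
  induction rs with
  | nil => intro ks ks' h; exact h
  | cons i t ih =>
      intro ks ks' h
      have h1 : aLoop (i :: t) ks = aLoop t
          (if (i - 1) ∈ ks then ks.filter (fun x => !(x == i - 1))
           else if (i + 1) ∈ ks then ks.filter (fun x => !(x == i + 1)) else ks) := rfl
      have h2 : aLoop (i :: t) ks' = aLoop t
          (if (i - 1) ∈ ks' then ks'.filter (fun x => !(x == i - 1))
           else if (i + 1) ∈ ks' then ks'.filter (fun x => !(x == i + 1)) else ks') := rfl
      rw [h1, h2]
      apply ih
      by_cases c1 : (i - 1) ∈ ks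
      · have c1' : (i - 1) ∈ ks' := h.mem_iff.mp c1
        simp only [if_pos c1, if_pos c1']; exact h.filter _
      · have c1' : (i - 1) ∉ ks' := fun hx => c1 (h.mem_iff.mpr hx)
        by_cases c2 : (i + 1) ∈ ks
        · have c2' : (i + 1) ∈ ks' := h.mem_iff.mp c2
          simp only [if_neg c1, if_neg c1', if_pos c2, if_pos c2']; exact h.filter _
        · have c2' : (i + 1) ∉ ks' := fun hx => c2 (h.mem_iff.mpr hx)
          simp only [if_neg c1, if_neg c1', if_neg c2, if_neg c2']; exact h

theorem aLoop_prefix (rs : List Int) : ∀ (P t : List Int),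
    (∀ p ∈ P, ∀ r ∈ rs, p < r - 1) →
    aLoop rs (P ++ t) = P ++ aLoop rs t := by
  induction rs with
  | nil => intro P t _; rfl
  | cons i rs ih =>
      intro P t hP
      have hne1 : (i - 1) ∈ P ++ t ↔ (i - 1) ∈ t := by
        simp only [List.mem_append, or_iff_right_iff_imp]
        intro hmem; exact absurd (hP _ hmem i (by simp)) (by omega)
      have hne2 : (i + 1) ∈ P ++ t ↔ (i + 1) ∈ t := by
        simp only [List.mem_append, or_iff_right_iff_imp]
        intro hmem; exact absurd (hP _ hmem i (by simp)) (by omega)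
      have hf1 : P.filter (fun x => !(x == i - 1)) = P := by
        apply List.filter_eq_self.mpr
        intro a ha; have := hP a ha i (by simp); simp; omega
      have hf2 : P.filter (fun x => !(x == i + 1)) = P := by
        apply List.filter_eq_self.mpr
        intro a ha; have := hP a ha i (by simp); simp; omega
      have h1 : aLoop (i :: rs) (P ++ t) = aLoop rs
          (if (i - 1) ∈ P ++ t then (P ++ t).filter (fun x => !(x == i - 1))
           else if (i + 1) ∈ P ++ t then (P ++ t).filter (fun x => !(x == i + 1))
           else P ++ t) := rfl
      have h2 : aLoop (i :: rs) t = aLoop rs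
          (if (i - 1) ∈ t then t.filter (fun x => !(x == i - 1))
           else if (i + 1) ∈ t then t.filter (fun x => !(x == i + 1)) else t) := rfl
      have hP' : ∀ p ∈ P, ∀ r ∈ rs, p < r - 1 := fun p hp r hr => hP p hp r (by simp [hr])
      rw [h1, h2]
      by_cases c1 : (i - 1) ∈ t
      · rw [if_pos (hne1.mpr c1), if_pos c1, List.filter_append, hf1, ih P _ hP']
      · have c1' : (i - 1) ∉ P ++ t := fun hm => c1 (hne1.mp hm)
        by_cases c2 : (i + 1) ∈ t
        · rw [if_neg c1', if_neg c1, if_pos (hne2.mpr c2), if_pos c2,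
              List.filter_append, hf2, ih P _ hP']
        · have c2' : (i + 1) ∉ P ++ t := fun hm => c2 (hne2.mp hm)
          rw [if_neg c1', if_neg c1, if_neg c2', if_neg c2, ih P t hP']

theorem sSkip_decomp (r : Int) : ∀ (ks : List Int),
    ∃ P, ks = P ++ sSkip r ks ∧ ∀ p ∈ P, p < r - 1 := by
  intro ks
  induction ks with
  | nil => exact ⟨[], rfl, by simp⟩
  | cons x t ih =>
      by_cases h : x < r - 1
      · obtain ⟨P, hP, hlt⟩ := ih
        refine ⟨x :: P, ?_, ?_⟩
        · simp only [sSkip, if_pos h]; simpa using hP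
        · intro p hp
          rcases List.mem_cons.mp hp with h' | h'
          · omega
          · exact hlt p h'
      · exact ⟨[], by simp [sSkip, h], by simp⟩

theorem sSkip_head (r : Int) : ∀ (ks : List Int) {x : Int} {t : List Int},
    sSkip r ks = x :: t → ¬(x < r - 1) := by
  intro ks
  induction ks with
  | nil => intro x t h; simp [sSkip] at h
  | cons y s ih =>
      intro x t h
      by_cases hy : y < r - 1
      · exact ih (by simpa [sSkip, hy] using h)
      · simp only [sSkip, if_neg hy] at h
        cases h; exact hy

theorem core (rs : List Int) : ∀ (ks : List Int) (u : Int),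
    ks.Pairwise (· < ·) → rs.Pairwise (· < ·) → (∀ x ∈ ks, x ∉ rs) →
    bLoop rs ks u = u - (ks.length : Int) + ((aLoop rs ks).length : Int) := by
  induction rs with
  | nil => intro ks u _ _ _; simp [bLoop, aLoop]
  | cons r rs ih =>
      intro ks u hks hrs hdisj
      obtain ⟨P, hPS, hPlt⟩ := sSkip_decomp r ks
      have hrlt : ∀ r' ∈ rs, r < r' := (List.pairwise_cons.mp hrs).1
      have hrs' : rs.Pairwise (· < ·) := (List.pairwise_cons.mp hrs).2
      have hP' : ∀ p ∈ P, ∀ r' ∈ rs, p < r' - 1 := by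
        intro p hp r' hr'; have := hPlt p hp; have := hrlt r' hr'; omega
      have hP'' : ∀ p ∈ P, ∀ r' ∈ r :: rs, p < r' - 1 := by
        intro p hp r' hr'
        rcases List.mem_cons.mp hr' with h | h
        · subst h; exact hPlt p hp
        · exact hP' p hp r' h
      cases hS : sSkip r ks with
      | nil =>
          -- no student ≥ r-1 remains; A matches nothing on r either
          rw [hS] at hPS
          have hmem : ∀ y ∈ ks, y < r - 1 := by
            intro y hy; rw [hPS] at hy; simp at hy; exact hPlt y hy
          have c1 : (r - 1) ∉ ks := fun h => by have := hmem _ h; omega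
          have c2 : (r + 1) ∉ ks := fun h => by have := hmem _ h; omega
          have hA : aLoop (r :: rs) ks = aLoop rs ks := by
            show aLoop rs (if (r-1) ∈ ks then _ else if (r+1) ∈ ks then _ else ks) = _
            rw [if_neg c1, if_neg c2]
          have hA2 : aLoop rs ks = ks := by
            rw [hPS]
            have := aLoop_prefix rs P [] hP'
            rw [aLoop_nil] at this
            simpa using this
          have hB : bLoop (r :: rs) ks u = bLoop rs [] u := by
            simp only [bLoop, hS]
          rw [hB, ih [] u (by simp) hrs' (by simp), hA, hA2, aLoop_nil]
          simp
      | cons x t =>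
          rw [hS] at hPS
          have hxlt : ¬(x < r - 1) := sSkip_head r ks hS
          have hsuffix : (x :: t).Sublist ks := hPS ▸ List.sublist_append_right P (x :: t)
          have hxt : (x :: t).Pairwise (· < ·) := hks.sublist hsuffix
          have htgt : ∀ y ∈ t, x < y := (List.pairwise_cons.mp hxt).1
          have htsorted : t.Pairwise (· < ·) := (List.pairwise_cons.mp hxt).2
          have hxks : x ∈ ks := hsuffix.mem (by simp)
          have hxner : x ≠ r := fun h => hdisj x hxks (by simp [h])
          have hdisj' : ∀ y ∈ x :: t, y ∉ rs := by
            intro y hy hyr; exact hdisj y (hsuffix.mem hy) (by simp [hyr])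
          have hdisjt : ∀ y ∈ t, y ∉ rs := fun y hy => hdisj' y (by simp [hy])
          have hlen : (ks.length : Int) = P.length + 1 + t.length := by
            rw [hPS]; simp; omega
          by_cases hmatch : x = r - 1 ∨ x = r + 1
          · -- B matches x; A erases the same x
            have hxmem : x ∈ ks := hxks
            have hfilter : ks.filter (fun y => !(y == x)) = P ++ t := by
              rw [hPS, List.filter_append, List.filter_cons]
              have h1 : P.filter (fun y => !(y == x)) = P := by
                apply List.filter_eq_self.mpr
                intro a ha; have := hPlt a ha; simp; omega
              have h2 : t.filter (fun y => !(y == x)) = t := by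
                apply List.filter_eq_self.mpr
                intro a ha; have := htgt a ha; simp; omega
              simp [h1, h2]
            have hstep : aLoop (r :: rs) ks = aLoop rs (P ++ t) := by
              show aLoop rs (if (r-1) ∈ ks then ks.filter (fun y => !(y == r-1))
                   else if (r+1) ∈ ks then ks.filter (fun y => !(y == r+1)) else ks) = _
              rcases hmatch with h | h
              · rw [if_pos (h ▸ hxmem), ← h, hfilter]
              · have c1 : (r - 1) ∉ ks := by
                  intro hc
                  rw [hPS] at hc
                  rcases List.mem_append.mp hc with hc | hc
                  · have := hPlt _ hc; omega
                  · rcases List.mem_cons.mp hc with hc | hc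
                    · omega
                    · have := htgt _ hc; omega
                rw [if_neg c1, if_pos (h ▸ hxmem), ← h, hfilter]
            have hB : bLoop (r :: rs) ks u = bLoop rs t (u - 1) := by
              simp only [bLoop, hS, if_pos hmatch]
            rw [hB, ih t (u - 1) htsorted hrs' hdisjt, hstep, aLoop_prefix rs P t hP']
            simp only [List.length_append]
            push_cast
            omega
          · -- x > r+1: A matches nothing on r
            push Not at hmatch
            have hxgt : r + 1 < x := by
              rcases hmatch with ⟨h1, h2⟩
              have := hxner; omega
            have c1 : (r - 1) ∉ ks := by
              intro hc; rw [hPS] at hc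
              rcases List.mem_append.mp hc with hc | hc
              · have := hPlt _ hc; omega
              · rcases List.mem_cons.mp hc with hc | hc
                · omega
                · have := htgt _ hc; omega
            have c2 : (r + 1) ∉ ks := by
              intro hc; rw [hPS] at hc
              rcases List.mem_append.mp hc with hc | hc
              · have := hPlt _ hc; omega
              · rcases List.mem_cons.mp hc with hc | hc
                · omega
                · have := htgt _ hc; omega
            have hstep : aLoop (r :: rs) ks = aLoop rs ks := by
              show aLoop rs (if (r-1) ∈ ks then _ else if (r+1) ∈ ks then _ else ks) = _
              rw [if_neg c1, if_neg c2]
            have hB : bLoop (r :: rs) ks u = bLoop rs (x :: t) u := by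
              have : ¬(x = r - 1 ∨ x = r + 1) := by push Not; exact hmatch
              simp only [bLoop, hS, if_neg this]
            rw [hB, ih (x :: t) u hxt hrs' hdisj', hstep]
            conv_rhs => rw [hPS]
            rw [aLoop_prefix rs P (x :: t) hP']
            simp only [List.length_append]
            push_cast
            omega

theorem advance_drop (L : List Int) (r : Int) (i : Nat) :
    L.drop (pvAdvance L r i) = sSkip r (L.drop i) := by
  induction i using pvAdvance.induct L r with
  | case1 i h hlt ih =>
      rw [pvAdvance, dif_pos h, if_pos hlt, ih,
          List.drop_eq_getElem_cons h, sSkip, if_pos hlt]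
  | case2 i h hlt =>
      rw [pvAdvance, dif_pos h, if_neg hlt, List.drop_eq_getElem_cons h, sSkip, if_neg hlt,
          ← List.drop_eq_getElem_cons h]
  | case3 i h =>
      rw [pvAdvance, dif_neg h]
      rw [List.drop_eq_nil_of_le (by omega)]
      rfl

theorem bridge (rs : List Int) : ∀ (L : List Int) (i : Nat) (m u : Int),
    pvLendB rs L i m + bLoop rs (L.drop i) u = m + u := by
  induction rs with
  | nil => intro L i m u; simp [pvLendB, bLoop]
  | cons r rs ih =>
      intro L i m u
      have hd := (advance_drop L r i).symm
      have h1 : pvLendB (r :: rs) L i m =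
          if h : pvAdvance L r i < L.length then
            if L[pvAdvance L r i] = r - 1 ∨ L[pvAdvance L r i] = r + 1 then
              pvLendB rs L (pvAdvance L r i + 1) (m + 1)
            else pvLendB rs L (pvAdvance L r i) m
          else pvLendB rs L (pvAdvance L r i) m := rfl
      have h2 : bLoop (r :: rs) (L.drop i) u =
          match sSkip r (L.drop i) with
          | [] => bLoop rs [] u
          | x :: t => if x = r - 1 ∨ x = r + 1 then bLoop rs t (u - 1) else bLoop rs (x :: t) u := rfl
      rw [h1, h2, hd]
      by_cases h : pvAdvance L r i < L.length
      · rw [dif_pos h, List.drop_eq_getElem_cons h]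
        by_cases hm : L[pvAdvance L r i] = r - 1 ∨ L[pvAdvance L r i] = r + 1
        · rw [if_pos hm]
          simp only [hm, if_pos]
          have := ih L (pvAdvance L r i + 1) (m + 1) (u - 1)
          omega
        · rw [if_neg hm]
          simp only [hm, if_false]
          have := ih L (pvAdvance L r i) m u
          rw [List.drop_eq_getElem_cons h] at this
          omega
      · rw [dif_neg h, List.drop_eq_nil_of_le (by omega)]
        have := ih L (pvAdvance L r i) m u
        rw [List.drop_eq_nil_of_le (by omega)] at this
        omega

theorem sorted_lt {xs : List Int} (h : xs.Nodup) :
    (PySem.List.sorted xs (fun x => x) false).Pairwise (· < ·) := by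
  have hperm := PySem.List.sorted_perm xs (fun x => x) false
  have hnd : (PySem.List.sorted xs (fun x => x) false).Nodup := hperm.nodup_iff.mpr h
  have hle := PySem.List.sorted_pairwise xs (fun x => x)
  exact (hle.and hnd).imp (fun hab => lt_of_le_of_ne hab.1 hab.2)

theorem keys_ditL2 (lost reserve : List Int) :
    (pvFilterZero (pvMark (pvMkZero lost).keys (pvMkZero lost, pvMkZero reserve)).1).keys
      = PySem.Set.diff (PySem.Set.ofList lost) (PySem.Set.ofList reserve) := by
  have hk := keys_mkZero lost
  rw [hk]
  have hcont : ∀ i ∈ PySem.Set.ofList lost, (pvMkZero lost).contains i = true := by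
    intro i hi
    rw [contains_mkZero]
    simp [(PySem.Set.mem_ofList lost i).mp hi]
  obtain ⟨⟨hk1, hk2⟩, hg1, hg2⟩ :=
    mark_spec (PySem.Set.ofList lost) (pvMkZero lost) (pvMkZero reserve) hcont
  have hnd : (pvMark (PySem.Set.ofList lost) (pvMkZero lost, pvMkZero reserve)).1.keys.Nodup := by
    rw [hk1, hk]; exact PySem.Set.nodup_ofList lost
  rw [filterZero_keys _ hnd, hk1, hk]
  show _ = (PySem.Set.ofList lost).filter (fun x => !(PySem.Set.contains (PySem.Set.ofList reserve) x))
  apply List.filter_congr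
  intro x hx
  rw [hg1 x]
  by_cases hr : x ∈ reserve
  · rw [if_pos ⟨hx, by rw [contains_mkZero]; simp [hr]⟩]
    simp [PySem.Set.contains, (PySem.Set.mem_ofList reserve x).mpr hr]
  · rw [if_neg (fun hc => hr (by have := hc.2; rw [contains_mkZero] at this; simpa using this))]
    rw [getD_mkZero]
    have : x ∉ PySem.Set.ofList reserve := fun hc => hr ((PySem.Set.mem_ofList reserve x).mp hc)
    simp [PySem.Set.contains, this]

theorem keys_ditR2 (lost reserve : List Int) :
    (pvFilterZero (pvMark (pvMkZero lost).keys (pvMkZero lost, pvMkZero reserve)).2).keys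
      = PySem.Set.diff (PySem.Set.ofList reserve) (PySem.Set.ofList lost) := by
  have hk := keys_mkZero lost
  have hkr := keys_mkZero reserve
  rw [hk]
  have hcont : ∀ i ∈ PySem.Set.ofList lost, (pvMkZero lost).contains i = true := by
    intro i hi
    rw [contains_mkZero]
    simp [(PySem.Set.mem_ofList lost i).mp hi]
  obtain ⟨⟨hk1, hk2⟩, hg1, hg2⟩ :=
    mark_spec (PySem.Set.ofList lost) (pvMkZero lost) (pvMkZero reserve) hcont
  have hnd : (pvMark (PySem.Set.ofList lost) (pvMkZero lost, pvMkZero reserve)).2.keys.Nodup := by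
    rw [hk2, hkr]; exact PySem.Set.nodup_ofList reserve
  rw [filterZero_keys _ hnd, hk2, hkr]
  show _ = (PySem.Set.ofList reserve).filter (fun x => !(PySem.Set.contains (PySem.Set.ofList lost) x))
  apply List.filter_congr
  intro x hx
  rw [hg2 x]
  have hxr : x ∈ reserve := (PySem.Set.mem_ofList reserve x).mp hx
  by_cases hl : x ∈ lost
  · rw [if_pos ⟨(PySem.Set.mem_ofList lost x).mpr hl, by rw [contains_mkZero]; simp [hxr]⟩]
    simp [PySem.Set.contains, (PySem.Set.mem_ofList lost x).mpr hl]
  · rw [if_neg (fun hc => hl ((PySem.Set.mem_ofList lost x).mp hc.1))]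
    rw [getD_mkZero]
    have : x ∉ PySem.Set.ofList lost := fun hc => hl ((PySem.Set.mem_ofList lost x).mp hc)
    simp [PySem.Set.contains, this]

-- ===== VERDICT (by name: the statement is the Claim_ definition above) =====
theorem solution_spec : Claim_equal_solution := by
  intro n lost reserve _
  show solution n lost reserve = solution_alt n lost reserve
  have hKs := keys_ditL2 lost reserve
  have hKr := keys_ditR2 lost reserve
  set Ks := PySem.Set.diff (PySem.Set.ofList lost) (PySem.Set.ofList reserve) with hKsdef
  set Kr := PySem.Set.diff (PySem.Set.ofList reserve) (PySem.Set.ofList lost) with hKrdef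
  set L := PySem.List.sorted Ks (fun x => x) false with hLdef
  set R := PySem.List.sorted Kr (fun x => x) false with hRdef
  have hndKs : Ks.Nodup := PySem.Set.nodup_diff _ _ (PySem.Set.nodup_ofList lost)
  have hndKr : Kr.Nodup := PySem.Set.nodup_diff _ _ (PySem.Set.nodup_ofList reserve)
  have hA : solution n lost reserve
      = n - ((aLoop R Ks).length : Int) := by
    show n - ((pvLend (PySem.List.sorted
        (pvFilterZero (pvMark (pvMkZero lost).keys (pvMkZero lost, pvMkZero reserve)).2).keys
        (fun x => x) false)
        (pvFilterZero (pvMark (pvMkZero lost).keys (pvMkZero lost, pvMkZero reserve)).1)).size : Int)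
      = _
    rw [hKr, size_eq_keys_length, lend_keys, hKs]
  have hB : solution_alt n lost reserve = n - bLoop R L (L.length : Int) := by
    show n - ((L.length : Int) - pvLendB R L 0 0) = _
    have hbr := bridge R L 0 0 (L.length : Int)
    rw [List.drop_zero] at hbr
    omega
  have hperm : Ks.Perm L := (PySem.List.sorted_perm Ks (fun x => x) false).symm
  have hlenperm : (aLoop R Ks).length = (aLoop R L).length := (aLoop_perm R hperm).length_eq
  have hmemL : ∀ x, x ∈ L ↔ (x ∈ lost ∧ x ∉ reserve) := by
    intro x
    rw [← hperm.mem_iff, hKsdef, PySem.Set.mem_diff, PySem.Set.mem_ofList, PySem.Set.mem_ofList]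
  have hmemR : ∀ x, x ∈ R ↔ (x ∈ reserve ∧ x ∉ lost) := by
    intro x
    rw [← ((PySem.List.sorted_perm Kr (fun x => x) false).symm).mem_iff, hKrdef,
        PySem.Set.mem_diff, PySem.Set.mem_ofList, PySem.Set.mem_ofList]
  have hdisj : ∀ x ∈ L, x ∉ R := by
    intro x hx hxr
    exact ((hmemR x).mp hxr).2 ((hmemL x).mp hx).1
  have hcore := core R L (L.length : Int)
    (by rw [hLdef]; exact sorted_lt hndKs)
    (by rw [hRdef]; exact sorted_lt hndKr) hdisj
  rw [hA, hB, hcore, hlenperm]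
  omega
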